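-- pv_equiv track=rewrite | github.com/lucasbezerra26/leitor-gabarito | school_test_reader.py | return_lyrics_of_dict
-- ===== SOURCE A (Python) =====
-- def return_lyrics_of_dict(data):
--     result = None
--     for key, value in zip(data.keys(), data.values()):
--         if value and result:
--             return None
--         elif value:
--             result = key
--     return result
-- ===== SOURCE B (Python) =====
-- def return_lyrics_of_dict(data):
--     keys = [k for k, v in zip(data.keys(), data.values()) if v]
--     return keys[0] if len(keys) == 1 else None
-- ===== Notes on version B (the rewrite author's own statement) =====
-- stated objective: simpler
-- what changed: Replaces A's stateful early-exit scan (mutable result plus truthiness guard) with a collect-all-truthy-keys comprehension followed by a single length check.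
-- intended difference: On dicts whose truthy entries number at least two and all but the last have key '' (falsy), A's truthiness test on result never fires so A returns the last truthy key (e.g. 'x' for {'':True,'x':True}), while B returns None, the intended answer since the truthy value is not unique. — e.g. on return_lyrics_of_dict([("", true), ("x", true)]): A returns some "x", B returns none
import Mathlib
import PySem

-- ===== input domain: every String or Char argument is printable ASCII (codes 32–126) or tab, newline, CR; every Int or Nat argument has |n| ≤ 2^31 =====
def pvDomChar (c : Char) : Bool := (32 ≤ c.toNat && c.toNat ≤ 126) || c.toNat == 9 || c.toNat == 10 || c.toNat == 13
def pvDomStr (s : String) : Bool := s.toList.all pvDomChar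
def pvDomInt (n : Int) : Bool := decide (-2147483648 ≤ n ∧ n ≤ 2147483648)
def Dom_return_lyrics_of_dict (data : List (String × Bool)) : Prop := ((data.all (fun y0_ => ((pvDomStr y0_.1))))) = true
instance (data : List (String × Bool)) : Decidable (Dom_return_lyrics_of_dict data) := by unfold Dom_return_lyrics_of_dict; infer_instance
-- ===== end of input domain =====

-- B replaces A's stateful early-exit scan with a collect-truthy-keys comprehension plus a
-- length check (simpler decomposition); return-value equivalence outside D_ below.

-- ===== PORT A =====
-- Python truthiness of `result` (None or a string): truthy iff a nonempty string.
def pyTruthyOptStr (r : Option String) : Bool :=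
  match r with
  | none => false
  | some s => !(s == "")

-- the `for key, value in zip(data.keys(), data.values())` loop with mutable `result`
def return_lyrics_of_dict_go (data : List (String × Bool)) (result : Option String) :
    Option String :=
  match data with
  | [] => result
  | (key, value) :: rest =>
    if value && pyTruthyOptStr result then none
    else if value then return_lyrics_of_dict_go rest (some key)
    else return_lyrics_of_dict_go rest result

def return_lyrics_of_dict (data : List (String × Bool)) : Option String :=
  return_lyrics_of_dict_go data none

-- ===== PORT B =====
def return_lyrics_of_dict_alt (data : List (String × Bool)) : Option String :=
  let keys := (data.filter (fun p => p.2)).map (fun p => p.1)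
  if keys.length = 1 then keys.head? else none

-- ===== PRECONDITION & SPEC =====
-- On dicts whose truthy entries number ≥ 2 and all but the last have the falsy key "",
-- A's truthiness test on `result` never fires so A returns the last truthy key,
-- while B returns none — the intended answer, since the truthy value is not unique.
def D_return_lyrics_of_dict (data : List (String × Bool)) : Prop :=
  2 ≤ data.countP (fun p => p.2) ∧
    ∀ i < data.length, ∀ j < data.length, i < j →
      (data[i]!).2 = true → (data[j]!).2 = true → (data[i]!).1 = ""
instance (data : List (String × Bool)) : Decidable (D_return_lyrics_of_dict data) := by
  unfold D_return_lyrics_of_dict; infer_instance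

def Spec_return_lyrics_of_dict (data : List (String × Bool)) (out : Option String) : Prop :=
  ¬ D_return_lyrics_of_dict data → out = return_lyrics_of_dict_alt data
instance (data : List (String × Bool)) (out : Option String) :
    Decidable (Spec_return_lyrics_of_dict data out) := by
  unfold Spec_return_lyrics_of_dict; infer_instance

def pvDiffWitness_return_lyrics_of_dict : (List (String × Bool)) := [("", true), ("x", true)]
def pvDiffWitnessOut_return_lyrics_of_dict : (Option String) × (Option String) :=
  (some "x", none)

-- ===== CLAIM (what is proved, stated in full; the proofs are below) =====
def Claim_unchanged_return_lyrics_of_dict : Prop :=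
  ∀ (data : List (String × Bool)), Dom_return_lyrics_of_dict data →
    Spec_return_lyrics_of_dict data (return_lyrics_of_dict data)
def Claim_changed_return_lyrics_of_dict : Prop :=
  Dom_return_lyrics_of_dict (pvDiffWitness_return_lyrics_of_dict) ∧
  D_return_lyrics_of_dict (pvDiffWitness_return_lyrics_of_dict) ∧
  return_lyrics_of_dict (pvDiffWitness_return_lyrics_of_dict) = pvDiffWitnessOut_return_lyrics_of_dict.1 ∧
  return_lyrics_of_dict_alt (pvDiffWitness_return_lyrics_of_dict) = pvDiffWitnessOut_return_lyrics_of_dict.2 ∧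
  pvDiffWitnessOut_return_lyrics_of_dict.1 ≠ pvDiffWitnessOut_return_lyrics_of_dict.2
def Claim_exact_return_lyrics_of_dict : Prop :=
  ∀ (data : List (String × Bool)), Dom_return_lyrics_of_dict data →
    D_return_lyrics_of_dict data →
    return_lyrics_of_dict data ≠ return_lyrics_of_dict_alt data

-- ===== LEMMAS AND PROOFS =====

-- proof-only model of A's loop, running over the truthy keys only
def fTruthy : List String → Option String → Option String
  | [], r => r
  | k :: ks, r => if pyTruthyOptStr r then none else fTruthy ks (some k)

def truthyKeys (data : List (String × Bool)) : List String :=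
  (data.filter (fun p => p.2)).map (fun p => p.1)

theorem go_eq_fTruthy (data : List (String × Bool)) (r : Option String) :
    return_lyrics_of_dict_go data r = fTruthy (truthyKeys data) r := by
  induction data generalizing r with
  | nil => rfl
  | cons hd tl ih =>
    obtain ⟨k, v⟩ := hd
    cases v with
    | true =>
      simp [return_lyrics_of_dict_go, truthyKeys, List.filter, fTruthy] at *
      by_cases h : pyTruthyOptStr r = true <;> simp [h, ih]
    | false =>
      simp [return_lyrics_of_dict_go, truthyKeys, List.filter] at *
      exact ih r

-- closed form of fTruthy started from none
theorem fTruthy_none (ks : List String) :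
    fTruthy ks none =
      match ks with
      | [] => none
      | _ :: _ => if ∀ k ∈ ks.dropLast, k = "" then ks.getLast? else none := by
  induction ks with
  | nil => rfl
  | cons k rest ih =>
    cases rest with
    | nil => simp [fTruthy, pyTruthyOptStr]
    | cons k2 rest2 =>
      have step : fTruthy (k :: k2 :: rest2) none =
          if k = "" then fTruthy (k2 :: rest2) none else none := by
        by_cases hk : k = ""
        · subst hk
          simp [fTruthy, pyTruthyOptStr]
        · simp [fTruthy, pyTruthyOptStr, hk]
      rw [step]
      by_cases hk : k = ""
      · simp only [hk, if_true, ih]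
        simp [List.dropLast, List.getLast?]
      · simp [hk, List.dropLast]

theorem A_eq_closed (data : List (String × Bool)) :
    return_lyrics_of_dict data =
      match truthyKeys data with
      | [] => none
      | _ :: _ =>
        if ∀ k ∈ (truthyKeys data).dropLast, k = "" then (truthyKeys data).getLast?
        else none := by
  unfold return_lyrics_of_dict
  rw [go_eq_fTruthy, fTruthy_none]

theorem alt_eq (data : List (String × Bool)) :
    return_lyrics_of_dict_alt data =
      if (truthyKeys data).length = 1 then (truthyKeys data).head? else none := rfl

theorem length_truthy (data : List (String × Bool)) :
    (truthyKeys data).length = (data.filter (fun p => p.2)).length := by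
  simp [truthyKeys]

theorem dropLast_truthy (data : List (String × Bool)) :
    (truthyKeys data).dropLast = ((data.filter (fun p => p.2)).dropLast).map (fun p => p.1) := by
  simp [truthyKeys, List.map_dropLast]

-- the index condition of D_ in terms of the truthy sublist
theorem lhs_cons (k : String) (v : Bool) (rest : List (String × Bool)) :
    (∀ i < ((k,v)::rest).length, ∀ j < ((k,v)::rest).length, i < j →
      ((((k,v)::rest))[i]!).2 = true → ((((k,v)::rest))[j]!).2 = true →
      ((((k,v)::rest))[i]!).1 = "")
    ↔ ((v = true → (∃ q ∈ rest, q.2 = true) → k = "") ∧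
       (∀ i < rest.length, ∀ j < rest.length, i < j →
         (rest[i]!).2 = true → (rest[j]!).2 = true → (rest[i]!).1 = "")) := by
  constructor
  · intro H
    refine ⟨?_, ?_⟩
    · rintro hv ⟨q, hq, hq2⟩
      obtain ⟨j, hj, rfl⟩ := List.getElem_of_mem hq
      have h0 := H 0 (by simp) (j+1) (by simp; omega) (by omega)
      simp only [List.getElem!_cons_zero, List.getElem!_cons_succ] at h0
      rw [getElem!_pos rest j hj] at h0
      exact h0 hv hq2
    · intro i hi j hj hij h1 h2
      have := H (i+1) (by simp; omega) (j+1) (by simp; omega) (by omega)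
      simp only [List.getElem!_cons_succ] at this
      exact this h1 h2
  · rintro ⟨hhead, hrest⟩ i hi j hj hij h1 h2
    cases i with
    | zero =>
      cases j with
      | zero => omega
      | succ j' =>
        simp only [List.getElem!_cons_zero, List.getElem!_cons_succ] at h1 h2 ⊢
        have hj' : j' < rest.length := by simp at hj; omega
        rw [getElem!_pos rest j' hj'] at h2
        exact hhead h1 ⟨rest[j'], List.getElem_mem hj', h2⟩
    | succ i' =>
      cases j with
      | zero => omega
      | succ j' =>
        simp only [List.getElem!_cons_succ] at h1 h2 ⊢
        exact hrest i' (by simp at hi; omega) j' (by simp at hj; omega) (by omega) h1 h2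

theorem exists_truthy_iff_filter_ne_nil (rest : List (String × Bool)) :
    (∃ q ∈ rest, q.2 = true) ↔ rest.filter (fun p => p.2) ≠ [] := by
  rw [Ne, List.filter_eq_nil_iff]
  simp

theorem lhs_iff_filter (data : List (String × Bool)) :
    (∀ i < data.length, ∀ j < data.length, i < j →
      (data[i]!).2 = true → (data[j]!).2 = true → (data[i]!).1 = "")
    ↔ (∀ p ∈ (data.filter (fun p => p.2)).dropLast, p.1 = "") := by
  induction data with
  | nil => simp
  | cons hd rest ih =>
    obtain ⟨k, v⟩ := hd
    rw [lhs_cons, ih]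
    cases v with
    | false => simp
    | true =>
      simp only [List.filter_cons]
      rcases hF : rest.filter (fun p => p.2) with _ | ⟨p, F'⟩
      · have hno : ¬ ∃ q ∈ rest, q.2 = true := by
          rw [exists_truthy_iff_filter_ne_nil]; simp [hF]
        simp [hF, hno]
      · have hyes : ∃ q ∈ rest, q.2 = true := by
          rw [exists_truthy_iff_filter_ne_nil]; simp [hF]
        simp [hF, hyes]

theorem D_iff (data : List (String × Bool)) :
    D_return_lyrics_of_dict data ↔
      (2 ≤ (data.filter (fun p => p.2)).length ∧
       ∀ p ∈ (data.filter (fun p => p.2)).dropLast, p.1 = "") := by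
  unfold D_return_lyrics_of_dict
  rw [List.countP_eq_length_filter, lhs_iff_filter]

-- ===== VERDICT (by name: the statement is the Claim_ definition above) =====
theorem return_lyrics_of_dict_spec : Claim_unchanged_return_lyrics_of_dict := by
  intro data _ hnd
  rw [A_eq_closed, alt_eq]
  rcases h : truthyKeys data with _ | ⟨k, rest⟩
  · simp
  · rcases rest with _ | ⟨k2, rest2⟩
    · simp
    · have hlen2 : 2 ≤ (truthyKeys data).length := by rw [h]; simp
      by_cases hall : ∀ k' ∈ (truthyKeys data).dropLast, k' = ""
      · exfalso
        apply hnd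
        rw [D_iff]
        refine ⟨by rw [← length_truthy]; exact hlen2, ?_⟩
        intro p hp
        apply hall
        rw [dropLast_truthy]
        exact List.mem_map_of_mem hp
      · rw [h] at hall
        have hlen : (truthyKeys data).length ≠ 1 := by omega
        rw [h] at hlen
        rw [if_neg hall, if_neg hlen]

theorem return_lyrics_of_dict_changed : Claim_changed_return_lyrics_of_dict := by
  unfold Claim_changed_return_lyrics_of_dict; decide

theorem return_lyrics_of_dict_tight : Claim_exact_return_lyrics_of_dict := by
  intro data _ hD
  obtain ⟨hlen, hall⟩ := (D_iff data).mp hD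
  rw [A_eq_closed, alt_eq]
  have hlenT : 2 ≤ (truthyKeys data).length := by rw [length_truthy]; exact hlen
  have hallT : ∀ k' ∈ (truthyKeys data).dropLast, k' = "" := by
    intro k' hk'
    rw [dropLast_truthy] at hk'
    obtain ⟨p, hp, hpk⟩ := List.mem_map.mp hk'
    rw [← hpk]; exact hall p hp
  rcases h : truthyKeys data with _ | ⟨k, rest⟩
  · rw [h] at hlenT; simp at hlenT
  · rw [h] at hallT hlenT
    rw [if_pos hallT]
    have hne1 : ¬((k :: rest).length = 1) := by
      simp only [List.length_cons] at hlenT ⊢; omega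
    rw [if_neg hne1]
    have hs := List.getLast?_isSome.mpr (show (k :: rest) ≠ [] by simp)
    intro hcontra
    simp only [] at hcontra
    rw [hcontra] at hs
    simp at hs
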